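-- pv_equiv track=rewrite | github.com/olzkh/alita-sdk | alita_sdk/tools/carrier/utils/utils.py | aggregate_errors
-- ===== SOURCE A (Python) =====
-- def aggregate_errors(test_errors: list) -> dict:
--     """Aggregates error counts from a list of error dictionaries."""
--     aggregated_errors = {}
--     for error_dict in test_errors:
--         for err, details in error_dict.items():
--             if err not in aggregated_errors:
--                 aggregated_errors[err] = details.copy()
--             else:
--                 count = aggregated_errors[err].get('Error count', 0)
--                 aggregated_errors[err]['Error count'] = int(count) + int(details.get('Error count', 0))
--     return aggregated_errors
-- ===== SOURCE B (Python) =====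
-- def _combine(group):
--     acc = group[0].copy()
--     for d in group[1:]:
--         acc['Error count'] = int(acc.get('Error count', 0)) + int(d.get('Error count', 0))
--     return acc
--
--
-- def aggregate_errors(test_errors: list) -> dict:
--     """Group each error key's detail dicts first, then fold each group's counts."""
--     groups = {}
--     for error_dict in test_errors:
--         for err, details in error_dict.items():
--             groups.setdefault(err, []).append(details)
--     return {err: _combine(group) for err, group in groups.items()}
-- ===== Notes on version B (the rewrite author's own statement) =====
-- stated objective: alternative
-- what changed: A maintains one running result dict and adds each duplicate's count into it during a single scan; B first builds an order-preserving dict grouping each error key to the list of its detail dicts, then combines each group separately (copy of the first detail dict, fold the tail adding 'Error count's).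
import Mathlib
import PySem

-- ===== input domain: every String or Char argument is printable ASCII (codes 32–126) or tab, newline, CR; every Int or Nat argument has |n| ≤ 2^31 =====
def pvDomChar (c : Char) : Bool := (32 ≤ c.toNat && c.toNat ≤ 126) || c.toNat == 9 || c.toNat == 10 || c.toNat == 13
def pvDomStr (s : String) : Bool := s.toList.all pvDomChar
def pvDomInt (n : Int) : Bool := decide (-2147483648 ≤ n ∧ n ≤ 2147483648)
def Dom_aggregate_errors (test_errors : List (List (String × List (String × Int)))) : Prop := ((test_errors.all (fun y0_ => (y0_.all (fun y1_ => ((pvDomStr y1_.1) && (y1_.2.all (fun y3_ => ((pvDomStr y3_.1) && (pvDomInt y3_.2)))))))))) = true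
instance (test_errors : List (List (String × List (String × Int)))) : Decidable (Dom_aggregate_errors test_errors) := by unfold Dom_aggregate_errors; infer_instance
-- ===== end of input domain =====

-- B replaces A's single running-total dict with a group-then-fold decomposition
-- (first collect each key's detail dicts, then combine each group); objective: alternative, same cost.

-- ===== PORT A =====
-- literal port of A: one dict of dicts, updated in place while scanning the input once
def aggregate_errors (test_errors : List (List (String × List (String × Int)))) : List (String × List (String × Int)) :=
  let agg : PySem.Dict String (PySem.Dict String Int) :=
    test_errors.foldl (fun agg error_dict =>
      (PySem.Dict.ofList error_dict).items.foldl (fun agg p =>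
        if agg.contains p.1 = false then
          agg.insert p.1 (PySem.Dict.ofList p.2)
        else
          let count := (agg.getD p.1 PySem.Dict.empty).getD "Error count" 0
          agg.insert p.1 ((agg.getD p.1 PySem.Dict.empty).insert "Error count"
            (count + (PySem.Dict.ofList p.2).getD "Error count" 0))) agg)
      PySem.Dict.empty
  agg.items.map (fun q => (q.1, q.2.items))

-- ===== PORT B =====
-- Source B's _combine: group[0].copy(), then fold the tail adding 'Error count's
-- (a group built by B is never empty; the [] case mirrors where Python's group[0] would be unreachable)
def pvCombine (group : List (PySem.Dict String Int)) : PySem.Dict String Int :=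
  match group with
  | [] => PySem.Dict.empty
  | d0 :: rest =>
    rest.foldl (fun acc d =>
      acc.insert "Error count" (acc.getD "Error count" 0 + d.getD "Error count" 0)) d0

def aggregate_errors_alt (test_errors : List (List (String × List (String × Int)))) : List (String × List (String × Int)) :=
  let groups : PySem.Dict String (List (PySem.Dict String Int)) :=
    test_errors.foldl (fun g error_dict =>
      (PySem.Dict.ofList error_dict).items.foldl (fun g p =>
        g.modify p.1 [] (· ++ [PySem.Dict.ofList p.2])) g)
      PySem.Dict.empty
  groups.items.map (fun q => (q.1, (pvCombine q.2).items))

-- ===== PRECONDITION & SPEC =====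
def Spec_aggregate_errors (test_errors : List (List (String × List (String × Int)))) (out : List (String × List (String × Int))) : Prop := out = aggregate_errors_alt test_errors
instance (test_errors : List (List (String × List (String × Int)))) (out : List (String × List (String × Int))) : Decidable (Spec_aggregate_errors test_errors out) := by unfold Spec_aggregate_errors; infer_instance

-- ===== CLAIM (what is proved, stated in full; the proofs are below) =====
def Claim_equal_aggregate_errors : Prop := ∀ (test_errors : List (List (String × List (String × Int)))), Dom_aggregate_errors test_errors → Spec_aggregate_errors test_errors (aggregate_errors test_errors)

-- ===== LEMMAS AND PROOFS =====

-- the two loop bodies, named for the proofs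
def pvStepA (agg : PySem.Dict String (PySem.Dict String Int)) (p : String × List (String × Int)) :
    PySem.Dict String (PySem.Dict String Int) :=
  if agg.contains p.1 = false then
    agg.insert p.1 (PySem.Dict.ofList p.2)
  else
    let count := (agg.getD p.1 PySem.Dict.empty).getD "Error count" 0
    agg.insert p.1 ((agg.getD p.1 PySem.Dict.empty).insert "Error count"
      (count + (PySem.Dict.ofList p.2).getD "Error count" 0))

def pvStepG (g : PySem.Dict String (List (PySem.Dict String Int))) (p : String × List (String × Int)) :
    PySem.Dict String (List (PySem.Dict String Int)) :=
  g.modify p.1 [] (· ++ [PySem.Dict.ofList p.2])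

-- invariant tying A's running dict to B's groups dict
def pvRel (a : PySem.Dict String (PySem.Dict String Int))
    (g : PySem.Dict String (List (PySem.Dict String Int))) : Prop :=
  a.items = g.items.map (fun q => (q.1, pvCombine q.2)) ∧
  (∀ q ∈ g.items, q.2 ≠ []) ∧ g.keys.Nodup

lemma pvRel_keys {a g} (h : pvRel a g) : a.keys = g.keys := by
  obtain ⟨h1, -, -⟩ := h
  simp only [PySem.Dict.keys, h1, List.map_map]
  rfl

lemma pvCombine_append {group : List (PySem.Dict String Int)} (h : group ≠ [])
    (d : PySem.Dict String Int) :
    pvCombine (group ++ [d]) =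
      (pvCombine group).insert "Error count"
        ((pvCombine group).getD "Error count" 0 + d.getD "Error count" 0) := by
  cases group with
  | nil => exact absurd rfl h
  | cons d0 rest => simp [pvCombine, List.foldl_append]

lemma pvRel_step {a g} (p : String × List (String × Int)) (h : pvRel a g) :
    pvRel (pvStepA a p) (pvStepG g p) := by
  obtain ⟨h1, h2, h3⟩ := h
  have hk := pvRel_keys ⟨h1, h2, h3⟩
  have hka : a.keys.Nodup := hk ▸ h3
  by_cases hc : g.contains p.1 = true
  · -- key already present: A adds counts, B appends to the group
    have hca : a.contains p.1 = true := by
      rw [PySem.Dict.contains_eq_decide_mem_keys] at hc ⊢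
      rw [hk]; exact hc
    obtain ⟨group, hget⟩ : ∃ group, g.get? p.1 = some group := by
      rw [PySem.Dict.contains_eq_isSome_get?, Option.isSome_iff_exists] at hc
      exact hc
    have hmem : (p.1, group) ∈ g.items := PySem.Dict.mem_items_of_get?_eq_some g hget
    have hgD : g.getD p.1 [] = group := PySem.Dict.getD_of_get?_eq_some g [] hget
    have hne : group ≠ [] := h2 _ hmem
    have hamem : (p.1, pvCombine group) ∈ a.items := by
      rw [h1]
      exact List.mem_map_of_mem hmem
    have haget : a.get? p.1 = some (pvCombine group) := PySem.Dict.get?_of_mem_items a hamem hka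
    have hagD : a.getD p.1 PySem.Dict.empty = pvCombine group :=
      PySem.Dict.getD_of_get?_eq_some a _ haget
    have hsa : pvStepA a p =
        a.insert p.1 ((pvCombine group).insert "Error count"
          ((pvCombine group).getD "Error count" 0 + (PySem.Dict.ofList p.2).getD "Error count" 0)) := by
      simp [pvStepA, hca, hagD]
    have hsg : pvStepG g p = g.insert p.1 (group ++ [PySem.Dict.ofList p.2]) := by
      show g.insert p.1 (g.getD p.1 [] ++ [PySem.Dict.ofList p.2]) = _
      rw [hgD]
    rw [hsa, hsg]
    refine ⟨?_, ?_, ?_⟩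
    · rw [PySem.Dict.items_insert_of_contains a _ hca,
        PySem.Dict.items_insert_of_contains g _ hc, h1, List.map_map, List.map_map]
      refine List.map_congr_left ?_
      rintro ⟨k, grp⟩ hq
      by_cases hkp : k = p.1
      · have hg2 : g.get? k = some grp := PySem.Dict.get?_of_mem_items g hq h3
        have hgr : grp = group := by
          rw [hkp, hget] at hg2; exact (Option.some.inj hg2).symm
        subst hgr; subst hkp
        simp [pvCombine_append hne]
      · simp [Function.comp, hkp]
    · intro q hq
      rcases (PySem.Dict.mem_items_insert g _ _ q).1 hq with hq | ⟨hq, -⟩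
      · subst hq; simp
      · exact h2 _ hq
    · rw [PySem.Dict.keys_insert_of_contains g _ hc]; exact h3
  · -- new key: both append a fresh entry
    have hc' : g.contains p.1 = false := by
      cases hb : g.contains p.1 with
      | false => rfl
      | true => exact absurd hb hc
    have hca : a.contains p.1 = false := by
      rw [PySem.Dict.contains_eq_decide_mem_keys] at hc' ⊢
      rw [hk]; exact hc'
    have hsa : pvStepA a p = a.insert p.1 (PySem.Dict.ofList p.2) := by
      simp [pvStepA, hca]
    have hsg : pvStepG g p = g.insert p.1 [PySem.Dict.ofList p.2] := by
      show g.insert p.1 (g.getD p.1 [] ++ [PySem.Dict.ofList p.2]) = _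
      rw [PySem.Dict.getD_of_not_contains g [] hc']
      rfl
    rw [hsa, hsg]
    refine ⟨?_, ?_, ?_⟩
    · rw [PySem.Dict.items_insert_of_not_contains a _ hca,
        PySem.Dict.items_insert_of_not_contains g _ hc', List.map_append, h1]
      rfl
    · intro q hq
      rcases (PySem.Dict.mem_items_insert g _ _ q).1 hq with hq | ⟨hq, -⟩
      · subst hq; simp
      · exact h2 _ hq
    · rw [PySem.Dict.keys_insert_of_not_contains g _ hc']
      have : p.1 ∉ g.keys := by
        intro hm
        rw [(PySem.Dict.contains_iff_mem_keys g p.1).2 hm] at hc'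
        exact Bool.true_eq_false.mp hc'
      rw [List.nodup_append]
      refine ⟨h3, List.nodup_singleton _, ?_⟩
      intro x hx y hy
      rw [List.mem_singleton] at hy
      subst hy
      exact fun he => this (he ▸ hx)

lemma pvRel_foldl (L : List (String × List (String × Int))) {a g} (h : pvRel a g) :
    pvRel (L.foldl pvStepA a) (L.foldl pvStepG g) := by
  induction L generalizing a g with
  | nil => exact h
  | cons p L ih => exact ih (pvRel_step p h)

lemma pvRel_outer (te : List (List (String × List (String × Int)))) {a g} (h : pvRel a g) :
    pvRel (te.foldl (fun a ed => (PySem.Dict.ofList ed).items.foldl pvStepA a) a)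
      (te.foldl (fun g ed => (PySem.Dict.ofList ed).items.foldl pvStepG g) g) := by
  induction te generalizing a g with
  | nil => exact h
  | cons ed te ih => exact ih (pvRel_foldl _ h)

lemma pvRel_empty : pvRel PySem.Dict.empty PySem.Dict.empty := by
  refine ⟨rfl, by intro q hq; simp [PySem.Dict.empty] at hq, ?_⟩
  simp [PySem.Dict.keys, PySem.Dict.empty]

-- ===== VERDICT (by name: the statement is the Claim_ definition above) =====
theorem aggregate_errors_spec : Claim_equal_aggregate_errors := by
  intro te _
  show aggregate_errors te = aggregate_errors_alt te
  have h := pvRel_outer te pvRel_empty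
  obtain ⟨h1, -, -⟩ := h
  show (te.foldl (fun a ed => (PySem.Dict.ofList ed).items.foldl pvStepA a)
      PySem.Dict.empty).items.map (fun q => (q.1, q.2.items)) =
    (te.foldl (fun g ed => (PySem.Dict.ofList ed).items.foldl pvStepG g)
      PySem.Dict.empty).items.map (fun q => (q.1, (pvCombine q.2).items))
  rw [h1, List.map_map]
  rfl
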